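-- pv_equiv track=rewrite | github.com/moezabdellah-droid/mocyno | scripts/fix_gsc_links.py | update_internal_links
-- ===== SOURCE A (Python) =====
-- TARGET_MAPPING = {
--     # FR Base
--     "contact.html": "/contact/",
--     "a-propos.html": "/a-propos/",
--     "mentions-legales.html": "/mentions-legales/",
--     "politique-confidentialite.html": "/politique-confidentialite/",
--     "cookies.html": "/cookies/",
--     # Zones FR
--     "zones/saint-tropez.html": "/zones/saint-tropez/",
--     "zones/ramatuelle.html": "/zones/ramatuelle/",
--     "zones/cannes.html": "/zones/cannes/",
--     "zones/nice.html": "/zones/nice/",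
--     "zones/toulon.html": "/zones/toulon/",
--     "zones/frejus.html": "/zones/frejus/",
--     "zones/sainte-maxime.html": "/zones/sainte-maxime/",
--     # EN Base
--     "en/contact.html": "/en/contact/",
--     "en/about.html": "/en/about/",
--     "en/legal.html": "/en/legal/",
--     "en/privacy.html": "/en/privacy/",
--     "en/cookies.html": "/en/cookies/",
--     # Zones EN
--     "en/zones/saint-tropez.html": "/en/zones/saint-tropez/",
--     "en/zones/ramatuelle.html": "/en/zones/ramatuelle/",
--     "en/zones/cannes.html": "/en/zones/cannes/",
--     "en/zones/nice.html": "/en/zones/nice/",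
--     "en/zones/toulon.html": "/en/zones/toulon/",
--     "en/zones/frejus.html": "/en/zones/frejus/",
--     "en/zones/sainte-maxime.html": "/en/zones/sainte-maxime/",
-- }
--
-- BASE_URL = "https://mocyno.com"
--
-- def update_internal_links(content):
--     """Updates internal links to target pages to use clean URLs."""
--
--     for html_file, clean_url in TARGET_MAPPING.items():
--         # Handle '/key'
--         target_abs = "/" + html_file
--         target_clean = clean_url
--
--         # Simple replace for href="/path/to/file.html"
--         # We need to be careful not to replace partial matches incorrectly if we had keys that were substrings of others (not the case here)
--
--         # Regex to match href="/path/to/file.html" allowing for quote variations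
--         # And ensure we don't break anchors #section
--
--         # Pattern: href="(/en/)?(zones/)?base.html"
--         # We simply loop over our known mapping and do string replacement for the absolute path version
--
--         # Replace href="/contact.html" -> href="/contact/"
--         content = content.replace(f'href="{target_abs}"', f'href="{target_clean}"')
--         content = content.replace(f"href='{target_abs}'", f"href='{target_clean}'")
--
--         # Replace full URL https://mocyno.com/contact.html
--         content = content.replace(f'href="{BASE_URL}{target_abs}"', f'href="{BASE_URL}{target_clean}"')
--
--     return content
-- ===== SOURCE B (Python) =====
-- TARGET_MAPPING = {
--     "contact.html": "/contact/",
--     "a-propos.html": "/a-propos/",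
--     "mentions-legales.html": "/mentions-legales/",
--     "politique-confidentialite.html": "/politique-confidentialite/",
--     "cookies.html": "/cookies/",
--     "zones/saint-tropez.html": "/zones/saint-tropez/",
--     "zones/ramatuelle.html": "/zones/ramatuelle/",
--     "zones/cannes.html": "/zones/cannes/",
--     "zones/nice.html": "/zones/nice/",
--     "zones/toulon.html": "/zones/toulon/",
--     "zones/frejus.html": "/zones/frejus/",
--     "zones/sainte-maxime.html": "/zones/sainte-maxime/",
--     "en/contact.html": "/en/contact/",
--     "en/about.html": "/en/about/",
--     "en/legal.html": "/en/legal/",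
--     "en/privacy.html": "/en/privacy/",
--     "en/cookies.html": "/en/cookies/",
--     "en/zones/saint-tropez.html": "/en/zones/saint-tropez/",
--     "en/zones/ramatuelle.html": "/en/zones/ramatuelle/",
--     "en/zones/cannes.html": "/en/zones/cannes/",
--     "en/zones/nice.html": "/en/zones/nice/",
--     "en/zones/toulon.html": "/en/zones/toulon/",
--     "en/zones/frejus.html": "/en/zones/frejus/",
--     "en/zones/sainte-maxime.html": "/en/zones/sainte-maxime/",
-- }
--
-- BASE_URL = "https://mocyno.com"
--
-- # All 72 literal href attributes A rewrites, as one search->replacement table,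
-- # in A's application order (double quote, single quote, BASE_URL form per key).
-- _RULES = []
-- for _f, _c in TARGET_MAPPING.items():
--     _RULES.append((f'href="/{_f}"', f'href="{_c}"'))
--     _RULES.append((f"href='/{_f}'", f"href='{_c}'"))
--     _RULES.append((f'href="{BASE_URL}/{_f}"', f'href="{BASE_URL}{_c}"'))
--
--
-- def update_internal_links(content):
--     """Updates internal links to target pages to use clean URLs.
--
--     Single left-to-right pass: jump to each 'href=' occurrence and rewrite it
--     via the precomputed table instead of running 72 full-text replace passes.
--     """
--     out = []
--     i = 0
--     while True:
--         j = content.find('href=', i)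
--         if j == -1:
--             out.append(content[i:])
--             return ''.join(out)
--         for pat, rep in _RULES:
--             if content.startswith(pat, j):
--                 out.append(content[i:j])
--                 out.append(rep)
--                 i = j + len(pat)
--                 break
--         else:
--             out.append(content[i:j + 5])
--             i = j + 5
-- ===== Notes on version B (the rewrite author's own statement) =====
-- stated objective: faster
-- what changed: A runs 72 sequential full-text str.replace passes (3 per mapping entry); B precomputes the 72 literal search-to-replacement pairs once and rewrites the content in a single left-to-right pass, jumping to each link-attribute position and looking it up in the table.
import Mathlib
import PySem

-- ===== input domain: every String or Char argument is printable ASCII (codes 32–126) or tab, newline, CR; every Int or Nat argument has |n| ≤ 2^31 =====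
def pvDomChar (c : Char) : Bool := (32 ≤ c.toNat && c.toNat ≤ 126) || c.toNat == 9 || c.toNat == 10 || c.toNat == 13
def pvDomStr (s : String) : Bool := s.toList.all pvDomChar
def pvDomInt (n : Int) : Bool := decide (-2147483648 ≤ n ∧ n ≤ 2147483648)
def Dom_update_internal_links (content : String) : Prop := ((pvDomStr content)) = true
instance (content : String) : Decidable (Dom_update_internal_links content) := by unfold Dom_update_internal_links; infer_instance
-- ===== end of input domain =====

-- B replaces A's 72 sequential full-text str.replace passes by one left-to-right pass over the
-- content, driven by a precomputed search→replacement table (same return value for every input).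

-- ===== PORT A =====
def pvTargetMapping : List (String × String) := [
  ("contact.html", "/contact/"), ("a-propos.html", "/a-propos/"),
  ("mentions-legales.html", "/mentions-legales/"), ("politique-confidentialite.html", "/politique-confidentialite/"),
  ("cookies.html", "/cookies/"),
  ("zones/saint-tropez.html", "/zones/saint-tropez/"), ("zones/ramatuelle.html", "/zones/ramatuelle/"),
  ("zones/cannes.html", "/zones/cannes/"), ("zones/nice.html", "/zones/nice/"),
  ("zones/toulon.html", "/zones/toulon/"), ("zones/frejus.html", "/zones/frejus/"),
  ("zones/sainte-maxime.html", "/zones/sainte-maxime/"),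
  ("en/contact.html", "/en/contact/"), ("en/about.html", "/en/about/"),
  ("en/legal.html", "/en/legal/"), ("en/privacy.html", "/en/privacy/"),
  ("en/cookies.html", "/en/cookies/"),
  ("en/zones/saint-tropez.html", "/en/zones/saint-tropez/"), ("en/zones/ramatuelle.html", "/en/zones/ramatuelle/"),
  ("en/zones/cannes.html", "/en/zones/cannes/"), ("en/zones/nice.html", "/en/zones/nice/"),
  ("en/zones/toulon.html", "/en/zones/toulon/"), ("en/zones/frejus.html", "/en/zones/frejus/"),
  ("en/zones/sainte-maxime.html", "/en/zones/sainte-maxime/")]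

def pvBaseUrl : String := "https://mocyno.com"

def update_internal_links (content : String) : String :=
  pvTargetMapping.foldl (fun content kv =>
    let target_abs := "/" ++ kv.1
    let target_clean := kv.2
    let c1 := PySem.Str.replace content ("href=\"" ++ target_abs ++ "\"") ("href=\"" ++ target_clean ++ "\"")
    let c2 := PySem.Str.replace c1 ("href='" ++ target_abs ++ "'") ("href='" ++ target_clean ++ "'")
    PySem.Str.replace c2 ("href=\"" ++ pvBaseUrl ++ target_abs ++ "\"")
      ("href=\"" ++ pvBaseUrl ++ target_clean ++ "\"")) content

-- ===== PORT B =====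
-- the three (search, replacement) literals Source B derives from one mapping entry
def pvRules3 (kv : String × String) : List (List Char × List Char) :=
  [ (("href=\"" ++ ("/" ++ kv.1) ++ "\"").toList, ("href=\"" ++ kv.2 ++ "\"").toList),
    (("href='" ++ ("/" ++ kv.1) ++ "'").toList, ("href='" ++ kv.2 ++ "'").toList),
    (("href=\"" ++ pvBaseUrl ++ ("/" ++ kv.1) ++ "\"").toList,
     ("href=\"" ++ pvBaseUrl ++ kv.2 ++ "\"").toList) ]

def pvRules : List (List Char × List Char) := pvTargetMapping.flatMap pvRules3

def pvHref : List Char := ['h', 'r', 'e', 'f', '=']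

-- Source B's while loop: jump to the next "href=", rewrite it via the table (or copy it), else copy one char
def pvScanB : List Char → List Char
  | [] => []
  | c :: t =>
    if pvHref.isPrefixOf (c :: t) then
      match pvRules.find? (fun pr => pr.1.isPrefixOf (c :: t)) with
      | some pr => pr.2 ++ pvScanB (t.drop (pr.1.length - 1))
      | none => pvHref ++ pvScanB (t.drop 4)
    else c :: pvScanB t
termination_by s => s.length
decreasing_by all_goals (simp; try omega)

def update_internal_links_alt (content : String) : String :=
  String.ofList (pvScanB content.toList)

-- ===== PRECONDITION & SPEC =====
def Spec_update_internal_links (content : String) (out : String) : Prop := out = update_internal_links_alt content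
instance (content : String) (out : String) : Decidable (Spec_update_internal_links content out) := by unfold Spec_update_internal_links; infer_instance

-- ===== CLAIM (what is proved, stated in full; the proofs are below) =====
def Claim_equal_update_internal_links : Prop := ∀ (content : String), Dom_update_internal_links content → Spec_update_internal_links content (update_internal_links content)

-- ===== LEMMAS AND PROOFS =====

-- single-rule left-to-right scan: Python's s.replace(p, r) for nonempty p
def pvScan1 (p r : List Char) : List Char → List Char
  | [] => []
  | c :: t =>
    if p.isPrefixOf (c :: t) then r ++ pvScan1 p r (t.drop (p.length - 1))
    else c :: pvScan1 p r t
termination_by s => s.length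
decreasing_by all_goals (simp; try omega)

-- multi-rule left-to-right scan (first matching rule wins)
def pvScanM (R : List (List Char × List Char)) : List Char → List Char
  | [] => []
  | c :: t =>
    match R.find? (fun pr => pr.1.isPrefixOf (c :: t)) with
    | some pr => pr.2 ++ pvScanM R (t.drop (pr.1.length - 1))
    | none => c :: pvScanM R t
termination_by s => s.length
decreasing_by all_goals (simp; try omega)

-- the non-interference conditions that make 72 sequential replaces equal one simultaneous pass
def pvGood (R : List (List Char × List Char)) : Prop :=
  (∀ pr ∈ R, pr.1 ≠ []) ∧
  ∀ pk ∈ R, ∀ pi ∈ R,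
    (∀ j < pi.2.length, ¬ pk.1 <+: pi.2.drop j ∧ ¬ pi.2.drop j <+: pk.1) ∧
    (∀ j, 1 ≤ j → j < pk.1.length →
      (¬ pi.1 <+: pk.1.drop j ∧ ¬ pk.1.drop j <+: pi.1) ∧
      (¬ pk.1.drop j <+: pi.2 ∧ ¬ pi.2 <+: pk.1.drop j))

-- ---------- a kernel-friendly check of pvGood: strings packed into base-1114112 naturals ----------
def pvB : Nat := 1114112

def pvEnc : List Char → Nat
  | [] => 0
  | c :: t => c.toNat + pvB * pvEnc t

-- (pvEnc s, s.length) for every rule string, precomputed (verified below in pvTabN_eq)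
def pvTabN : List ((Nat × Nat) × (Nat × Nat)) := [
  ((264928294269408832000013216559379988135143059928309748672703713886379884188693524537300739284350046748175921002446952, 20), (171953981423241707540611620906761734935320748525436271022839072925845779157281439535602991208, 16)),
  ((303888226464654100885189562296929907181122754370983564298940228778489682501745797569129128144542888761889231838773352, 20), (197241300256812227785492252741574243733398085215581522721340397274480422954856975850282287208, 16)),
  ((1852881645891643537605158175397423595198126103534958679383334214802507009627943081494777047629226183686203603317224257027105618043518265019521154466170743400436329519933112386984836864908924568502628493751434029061919757959272, 38), (1202628722597362111565724364826730194422207104338944629775797106097706675189740856444329368985652814326692810363426573050565516954925914879454526557645819771456868236764676160421299981519136020491272296, 34)),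
  ((295159791785079612637198724727403957336681096453016573298823306315362718500496639484306501287548339951408463639072440713320, 21), (191575994151406125863156061734259710058490050034138117701272290515601875249145843855828914002853992, 17)),
  ((338565519762988709645400313629757172744835625787932783373800922394840950118647933496333329389740860145628953176828814688360, 21), (219748899511713045314220512229006343860533587768669224361592988426440300872342958095824168923824232, 17)),
  ((2064317676267630764968357985108374396461626507564566489753500022943949890132786408833318971127053451950841365754625752378913674980712993344810757102554824426638546436063123239428694592753843097609557735071563161555906368919666032744, 39), (1339863091390360548678815330151386405142335900629892458855195875393766940318984402751760348340277559255791393111685288159169589630841712504660792895723639801240870816327112843737936530502817342885112505827432, 35)),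
  ((700628841776562829023433925648347590024616796903105317408710874218998342736222120233876585380796675350914942058564053780441133086272166586839536825841379035265420301041768, 29), (454749158354970360302350514578569169629560729132310836504464089351717084631717769839427652768175196154357628116341041929345954491176505397140914280, 25)),
  ((803662201217929316627506958510259196935470700341848431226509900913126312962362303874111791674650402184514810565630861334867167617310602783317068008680856795658102198370408, 29), (521623951607451416185190841045669101026592303127206329971990872548960505946847068980500008834753190795575357423682768982802341949644876831018582120, 25)),
  ((4900127127191541535115912171017124006317540797796749488806030876661786432550900302513868170006812103133028945809586199512352114240394003158048211950417542392606850523640462507888502320467772775647371242297448748769446058974166789697221445590988780458918073825628418900919042834536, 47), (3180469535442486715468265459363893720128372913832259331519319698849809991389248469218083536700606324738257542046804783834693495150324179861389627995304506644665697838214239065343144677315567456001686379807151052695269166317893250754377291903782782168596584, 43)),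
  ((1852881645891643537605158175397423594770676194171664705327989398459755652612722206611431876324463068446662526004038519683609426098974407850788576409089898871185579580565632328265749502855733191024159464192588683873923038838888, 38), (1202628722596934661656361070852674849605864352981929408900913760926401912074501315367016183248309318134748266506257840472508436110396664129515159077587100684094815045387197691391741136173948023772151912, 34)),
  ((2125363463995767510113682901445016632165138116498760683884115252229984073610974911413567949912897160366828304348245051301885663178269151369139759212711974771036549421023483282771606982516919223819709521763049792684144257532008, 38), (1379485668246107482879152471557945331356631297004384134993377850320327004773100660869326490484744936299778106820797706480719901359239502424821509174694982227994794512090771104342257599655703439140323432, 34)),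
  ((12958866485551342550454254368942598761110076740709272803436060556691815647349148614416039918435800511626664599441684798480123980573997518975191844186560485718526108643526777473816464586404671221739793945655336955334421606612124109274663921074064564711885523710404636465199970291377578777217391782333131534692545265020653730109288743016, 56), (8411063427811747138357633097718215824743052900452576393309704119640048498334675617530796090391141798486491483496315962419600030213921631941278285524436412448454693111896890981865468258064171433724911082140835685990754978535086268281469843883873580876045489381444675670327371546873315747268349076164021962539112, 52)),
  ((264928294269408832000013216559379988131068560169821565791171982024851583731643690045352950010850064750794191123120232, 20), (171953981423237633040853132723880203203459220224979221188347125136572279175284057805723664488, 16)),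
  ((303888226464654100885189562296929907177048254612495381417408496916961382044695963077181338871042906764507501959446632, 20), (197241300256808153285733764558692712001536556915124472886848449485206922972859594120402960488, 16)),
  ((1852881645891643537605158175397423595169629465078458286462936323453674817625323614855987537816566735511129780324077838534045151308691373953929137427521832613139688237361965474495453056321292118127418622443981261330594808332392, 38), (1202628722597333614927267864433809796530858272146942010309158316587894015741565782621336222567159753859957983472360981033526868044138618238171955410733330387648280604314300950549992528751404695541645416, 34)),
  ((869652431036697112194072726871922515320910609088907780228666986145528738220868525402324576779885149651218643693561274216030969617097138084968949347770419942452444570466247336698970216, 31), (564455368512331130252905902740741446367922362862300784993173427805108802591224536188078508617944348414951559742212302000020595422375132846027415659145166192744, 27)),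
  ((997542129794827179505128934835243726045413963770174084441343565105230909527947197372689220165280620070489044688821684099379395983650627615602994500371115007691610207783096609087291496, 31), (647463407946773568351170361963160942283695587178882567238227278465782975230217504986725133264198437558349352628441778509947380126775350627144065165024740638824, 27)),
  ((6082260983926199830911910241337076026293688587967355180101629102421445192118096523271178192175127388843540340199956275972624944606721633851566482232119065060725549542655142594474758166039585329614825013130050389137970708198683372257030116206500969243871666742365666939991605690864178170036328, 49), (3947743653148445074643797039406592837667763036411997856574637024885865009083793078323866704679944916666397005626150315294438795872496514256631793510212878234649446952526820588304178417466675313505188070234234688331907699470162769029192301129763874452264103905946894440, 45)),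
  ((700628841776562829023433925648347589873760798030588699849526664936659573645902272767360454672597667001266460831890298257999819602767025838903285993353407741054268814262376, 29), (454749158354819504303477997961009985420278390363220516656997573221008885623368121358200979012652754840874122975593105678513466519882294245654134888, 25)),
  ((803662201217929316627506958510259196784614701469331813667325691630787543872042456407595660966451393834866329338957105812425854133805462035380817176192885501446950711591016, 29), (521623951607300560186318324428109916817309964358116010124524356418252306938497420499273335079230749482091852282934832731969853978350665679531802728, 25)),
  ((4900127127191541535115912171017124005262469227376676075759193680137141821192721116298458730499761739892123540321905003583914577198166241214670606530833103285117581442775010195455612741113462528532440404547485793033651856567817965930603657831877642468831145143771202048998000164968, 47), (3180469535441431643897845385950846882931848269220901152333104289410302941026007563812595855504677887201215314284861406229273910711216690592308762542992073755086343527967124134505394714359831661799280030983384434907510055179903163825695434686930861125927016, 43)),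
  ((454749890662319756227594879789744284231190936398396704067421642886995943084290438349888648973089374345671973194929078048210231023591568806727778408, 25), (295159316473948793942796682405687163645601408963784648376550701257503766567997338792611165553079731217718275274209020215400, 21)),
  ((521624683914800812110435206256844215628222510393292197534948426084239364399419737490961005039667368986889702502270805101666618482059940240605446248, 25), (338565044451857890950998271308040379053755938298700858451528317336981998186148632804637993655272251411938764811965394190440, 21)),
  ((3180474657125886327901115469096575388113179823669480441197385660621545035878861423376202046346962598026548311977189018101569498786879541791977482378997764967567196263108562469025518253880937765981843090764528995043353999766110136255130200579673100433621096, 43), (2064314351989743381709264974220238960748168614736853082460889436393221823207830382131353817836204910817045013553892815087511329106192969904691947022749852662327239721624170858784816001708221849531113485500283715638933291968404521064, 39)),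
  ((366365777662403968742570765533803781814560905160763578010949511947595964739164274783618473671503679931355544300800422384351318912401512, 23), (237792849948245348290236594975183050162779328306749462098745852408946993532372542579831848085568099598445183080, 19)),
  ((420242944296295393772683656017837581526297866775799788677742642386689357045343562466760136441801028135166886297639644621895076823564392, 23), (272762343316277708488471912194232767826694351610217888635966988966231896946977432028734654542728783343291334760, 19)),
  ((2562325126447890759414399846028806760472428455364484055946504521926648174268345447100910047151251681940622232386395744718919125819564297617991189642277328033226927253031935061914440342598216770665630840355192137559782442691501039671092981137512, 41), (1663099097846135974807109001703708941843606615881979566663515963811473048356785796725016965803458264716047558421321231897529809985781446252680015981935247372993137454391597400279631835680624479456146714809113711878471784, 37)),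
  ((454749890662319756227594879789744284196221505805896948306969799748269069420226354760036672742574825278904393454090904271381551808716673096426324072, 25), (295159316473913824512204182649926711802462682090120584292960849281273252018930571212870327379302902538503400378498718761064, 21)),
  ((521624683914800812110435206256844215593253079800792441774496582945512490735355653901109028809152819920122122761432631324837939267185044530303991912, 25), (338565044451822921520405771552279927210617211425036794367938465360751483637081865224897155481495422732723889916255092736104, 21)),
  ((3180474657125886327901115469096575387868607169431822813734807663842900088288156749552504988442146244138896308743714750425621319740340692132020675356238129684301867098422987549694085114515720592597303985124589594385679527648954161066990523016785725228187752, 43), (2064314351989498809055027316592776382751389969789262377787065739335317006853942730128120343568528962637998474704232858280488569470909704575527261447830521229187874504450786319679176062307564175058996329525095575961370404593199087720, 39)),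
  ((454749890662319756227594879789744284231191036839244363400856759707607808861667919492717814868548266722143423508406660013247326352249041162870063208, 25), (295159316473948794043237530065020598762422020829562025857693530423399225460373810242924643135044768313046932746565162500200, 21)),
  ((521624683914800812110435206256844215628222610834139856868383542904851230176797218633790170935126261363361152815748387066703713810717412596747731048, 25), (338565044451857891051439118967373814170576550164478235932671146502877457078525104254951471237237288507267422284321536475240, 21)),
  ((3180474657125886327901115469096575388113180526142591661719219332520748904797914178253877286959880264843172223163596955998696993307239037678599329123145796213213439233150950975908737505095777829137213923696610884552810486536319702576756824221688519191560296, 43), (2064314351989743382411738085440760794420067818605772135215767111633834740874647006042540225774102038311565373049779436934255477137438616147661989411256735881578454561687326229617748083597731306017883695066605342262575307387162460264, 39)),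
  ((968890209247156693060762753880731337076285226940392062282446228509479576035308303575244204183524064238288407480233264520616626455725987562932810921974254852148185138110085378020512957071464, 32), (628866499523697335054752631951729259891099631795682232199316643564103510932904420363490035719536459832112194788372444090673176663962426612566114908466775547182186600, 28)),
  ((1111373657309974498612818207847163057798983108431047027001439757247431281514580336961491097754913782578042592473864830296573708451819628890886568235028510870804307797225073279954885450793064, 32), (721346752354082868649286245144937489324813570285477794779918079231368534760078154817687823997423895595841396616435338624100726614989294430474140161086655267549085800, 28)),
  ((6776319949323986346016930142796532443617547303484068285541914774423751149973752984587936522659459348902510645765749323139492512780630813088535867738987045775422252774924481014111095512998372762295402672235982103284606649644908343804944908148161125558046022242698676003690385745519285559287054729320, 50), (4398228576894331872324916589438486488131573602027136432214935242714259680823826130307824677720985870387527847692316479504404192157061323680807418606038185829504880321445108710023952460444773890707884348119376597658159454789813800600516521174361332151706924545152217999605864, 46)),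
  ((366365777662403968742570765533803781899079621241648020730798358754902389586837862255283181678629186492318054544568856032055320074387560, 23), (237792849948329867006317479417902899009586634731597135686217517116954119038933505090075616519215803599607169128, 19)),
  ((420242944296295393772683656017837581610816582856684231397591489193995781893017149938424844448926534696129396541408078269599077985550440, 23), (272762343316362227204552796636952616673501658035065562223438653674239022453538394538978422976376487344453320808, 19)),
  ((2562325126447890759414399846028806761063543791657503758681124930766226243090166716313564300011302103246002587280772052408813936339977922556596983383282758992320034876087926519362745498690765412368331937277507241635672023090697366208225270169704, 41), (1663099097846727090143402021406443562252446193950801387932728618064333098778091177079911342111148159526567972046259837691270815416740539360303071973392695678149230003033300101376554150784700369036545911135650844167503976, 37)),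
  ((295159791785079612637198724727403957341220578124027542866961157313306799444676854502877568489136998369540942794562835972200, 21), (191575994151410665344827072703827847909487994115082297916290861582803463907563976334984404398112872, 17)),
  ((338565519762988709645400313629757172749375107458943752941938773392785031062828148514904396591329518563761432332319209947240, 21), (219748899511717584795891523198574481711531531849613404576611559493641889530761090574979659319083112, 17)),
  ((2064317676267630764968357985108374396493375182402311001092501204668054710585444156276403765029148709963380683932256695982687763300523813419476634739339938925371770607919230248094422872538325815781778092747055581858154524445888348264, 39), (1339863091390392297353653074662725406324060005450345116602638960187669035576996942069937979283881333344111203931759954036806374745340445728832649002732305529520655299045285064095612022923119591040638728142952, 35)),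
  ((295159791785079612637198724727403957304904838842079311556992762123261699692627358840914996109496833516380798195432032436328, 21), (191575994151374349605545124472517879514297949015330248420628899010423823742710816190385273594577000, 17)),
  ((338565519762988709645400313629757172713059368176995521631970378202739931310778652852941824211689353710601287733188406411368, 21), (219748899511681269056609574967264513316341486749861355080949596921262249365907930430380528515547240, 17)),
  ((2064317676267630764968357985108374396239386581607254812805402066817177062494131877951794397281722460959005034855138722259241321673109710298760143897457994606083699605844726713694517773504198697389505440016651340944209907220191772776, 39), (1339863091390138308752858018474438307186209127802253804324314350819921609327992566420860861310157886902483789828639237545964492801021157657830574499197905624421621171926892791442881618682205646423413031567464, 35)),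
  ((366365777662403968742570765533803781927252526601954940190011805109508702062228601626413785888064555389273681081710481698684435094962280, 23), (237792849948358039911677786337362112455941241044072526425588647721163554407830460716612758144882432714627743848, 19)),
  ((420242944296295393772683656017837581638989488216991150856804935548602094368407889309555448658361903593085023078549703936228193006125160, 23), (272762343316390400109913103556411830119856264347540952962809784278448457822435350165515564602043116459473895528, 19)),
  ((2562325126447890759414399846028806761260582237088594988936284755124273788834411146750369501954960478381243941905348081165230761197129606642932969783037851431195992716464060965576988515523457173115554509298665427607387646838165930399183072788584, 41), (1663099097846924128588833112636698722076804241496545632363165423266276757153226418434535918139904576351425123730346173677670570509179415318143448107838909921166062694794047323948575308970672084660293379699841801970122856, 37)),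
  ((366365777662403968742570765533803781893445050284550485889914784125968082673068324631442890832319358310240347728567381382891165501751400, 23), (237792849948324232435360381883062015434957700424683366148593676826107809210751427383259615044566639445034532968, 19)),
  ((420242944296295393772683656017837581605182011899586696556707914565061474979247612314584553602616706514051689725406603620434923412914280, 23), (272762343316356592633595699102111733098872723728151792685814813383392712625356316832162421501727323189880684648, 19)),
  ((2562325126447890759414399846028806761024136173314317760085010983656710904007298088067837878608742334671046221743820114813092747496541495844863662976149845379457490393569301214544154040353182697722692081109371122761614364775387840094677146665064, 41), (1663099097846687682525058835407847448305336678611718519304482891642930539009516220714374390173552438337724535619548104370863682503127676815820553348087877086690892420318654461520386014665826311378230601609537296043999336, 37)),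
  ((1202630659255897950750527502763732433629561150762290926420488327431839490838359456776121027734010605817724211454371466506246579519142028355473673594108230595979177873000419492380665844883442724819304552, 34), (780577743162625230306142251375434216468766506714566464681747875741808065194564494056786446392223464763534901048638297373281444904735641027514443961194660084699677973690696466536, 30)),
  ((1379487604905070771973318903469002915380328094784745652512952416825764583536958802278431334970446223982754051768911332514458044767984866650780023691216112139879157339703992905331182308365198140187476072, 34), (895368445316564930543691266163284280667431770782511432703523584970056366359149986332576172546681428073570517750783512471358143088179935255234857314755668923924614962962398052456, 30)),
  ((8411076972608301714038550644606410165875703899519916037526791847369336332924851921378793109520185173785250133518731230645174733401693405112774982441510387509763188378882170692001831297406034134581181463566542432476805573980462590469606164698992263751984974755574277640900345863485318619452944186866265930989672, 52), (5459281642551817997433386630312694362124892850609356441264975950914945729643578707161453089714282821106785807545707399680947127136746104471630588279563966791697210426370271443412490730531422567318747710457594294533563446570236190831773704469250519938748494657595967233004864349569941608, 48)),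
  ((968890209247156693060762753880731337076285213565469426700225702994051161101870776571786486599126192274854891173040343292615512111482353736267632720707572186986538937698160869715600506749032, 32), (628866499523697335041377709316147039365584203380748794672313185846519113060940986847182842798308458717767951154545778912471909981297264966365702983958470634731864168, 28)),
  ((1111373657309974498612818207847163057798983095056124391419219231732002866581142809958033380170515910614609076166671909068572594107575995064221390033761828205642661596813148771649973000470632, 32), (721346752354082868635911322509355268799298141870544357252914621513784136888114721301380631076195894481497152982608673445899459932324132784273728236578350355098763368, 28)),
  ((6776319949323986346016930142796532443617547209941214604954243447704806982215899471398710230249353026574283337253645892630201217859976347080862122760006657316217911693381471808180896919359266868660181351115840285662746373900100446966647179656280055231254315240652304538550629555984113665168995647592, 50), (4398228576894331872231373735757898816804854657859378578701746016421849574501497902999312574290476579092607193226308805759425211768602119339725875596832255630911241215551473488702832318627152030432139540222538299929667573719487008893514474802896192395517389373258099940524136, 46)),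
  ((628867512221897644961578302404379083992109228608185424626247468478963268847230366674883035465689563582859397070235571584756588294309779568025149783167599396024090728, 28), (408171851981641307429011205283635448298684302399540207719248244390819808320374685440923177389278808013349740427253538269218298997443294003304, 24)),
  ((721347765052283178556111915597587313425823167097980987206848904146228292674404101129080823743576999346588598898298466118184138245336647385933175035787479116390989928, 28), (468197049854459350752160337926583312963126992178391430457650472530579025809396704000163501581620327215384840414421430427370975586639888384104, 24)),
  ((4398235659602931783443596488519218899282604260430612828530539083100812823543963821413290938819299594908935365156912177422355694700381779946952349378926282431146294318053708521894010148039647558137394431813618865093461193507124243886017739540967085159975261712942927524790376, 46), (2854712574177898375987571788827970172846771904598615438876709195371949163815126867020389016760349361798231398449408133651387232097224966853531119839033564418819008154708757524275893234349710815591190851748350408437853324852991515251006356412777496680, 42)),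
  ((506642310185578388250238186712311583884292772398175060898588378905090994706229645559506390704400584971637425650519040425787720445978804307257170213339240, 26), (328840536395314950893062581940501562381033251114024746828804290127619730414545283249163981092096105629974366256700416001775370344, 22)),
  ((581148319845686562381981188513225222652902413364776068916681578386538257314470979284164795466447927737353792484580137074900508542700556867572761581715560, 26), (377199378804239210779064070555680107905843110100406915467857751933159381999107057723491214593124151073950336934914620598950953064, 22)),
  ((3543404981199835468550567557506123798038601811187048234034176775779104922639869238038686495012523676419508650628635850581487474785517376396834875173847038052298372594475159698411621504754718876653782316013850322218441854679262211166559411949458434492453904056424, 44), (2299877391323234029294351614999189744079716345841331660586584631039677968380129277554801970536376237277552723576886523261103038973287614234887545234358804512642612620278468462968944924689643161868099749272735174791844485458725249209204840, 40)),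
  ((628867512221897644961578302404379083943750473010701536634519276760510972636646193362832163531295053080607909999564036357533607416351737483415615560430657758370594920, 28), (408171851981592948673413721395643720106965850103329623545936193518885413809872433953852505854051585032471782385168928734995562055805640507496, 24)),
  ((721347765052283178556111915597587313377464411500497099215120712427775996463819927817029951809182488844337111827626930890961157367378605301323640813050537478737494120, 28), (468197049854410991996562854038591584771408539882180846284338421658644631298894452513092830046393104234506882372336820893148238645002234888296, 24)),
  ((4398235659602931783443596488519218898944388023800110709024310748309177399847113564299476099100761083861566278365779934228742390622965662709552326065424592504547844397133795954716636487702919062541318438356171614015943805707559901835505519181053692157913257622463334835159144, 46), (2854712574177560159750941286708463944511980269174918588619595380532230625304079497933597884517155748494153982332170733628073730407298368403610199926466387045158671426213161448282435787098633298203391287406299896217493411459989453246915876820087865448, 42)),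
  ((628867512221897644961578302404379083992109367506483785926656717164922855747015233770199306968007177264689623023634766738055880057749719449711543546625593107993985128, 28), (408171851981641307567909503644935857547370261986439992586343560662322125934056515666876576584432107305113180367135224662981756991155263897704, 24)),
  ((721347765052283178556111915597587313425823305996279348507258152832187879574188968224397095245894613028418824851697661271483430008776587267619568799245472828360884328, 28), (468197049854459350891058636287883722211812951765291215324745788802081343423078534226116900776773626507148280354303116821134433580351858278504, 24)),
  ((4398235659602931783443596488519218899282605231871237503825480192526701737683108606778675786908004798742462213171050533829384002895993262666063250547895338615874385806545012959551759844504943103206914580138484850983787237978491906483215031092365195865221132910528920210767976, 46), (2854712574177898376959012413503265113956197793512754583662074580220037869018960393868403155116756390106427009932127244552556201153409694945019611143471222168515473450253827044424218100335601141635662219410947605729404722963696761122203942405463474280, 42)),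
  ((1339865249044906977706571697159107468663157671112626538174832475285969968406100954560463186572679324300878544489554354593363842887633723808759624266052407257239277227038383751893669840759780516486456693358696, 35), (869651030589965980625151305033946415162284618738368267722964194774579152430278719790412163014234025228317799037414096901972110443956326219854766330884903597739912624999941793385676904, 31)),
  ((1536903694475998207904738270181657775627468132651371617971159826848814641282722868576733127588479083725956269942066993791504334858952516067619972585441463379876771150646425772275180991515004331188396097667176, 35), (997540729348096047936207512997267625886787973419634571935640773734281323737357391760776806399629495647588200032674506785320536810509815750488811483485598662979078262316791065773998184, 31)),
  ((9370881788106580239230917735763736839697572778853541903380504227625239792849549471742202845387120481996794788904909027538835448552159668706822287905355605411329596574878398286485316152883538320870869141692836884415729676674189426829752311049598179687656703665519648281013693326376418765226393736558660367954526470248, 53), (6082251189343664513312456854677915996284657517330393300338515919522305384682327322785210913026461340924895881842112980800006845293136528256341003194654047942113830409363360218262132661935708390185660317482567773119061913095993388259439702712315590197194679943431028681080156141327114545791080, 49))]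

def pvIsPreN (a b : Nat × Nat) : Bool := a.2.ble b.2 && b.1 % pvB ^ a.2 == a.1
def pvNoOvN (a b : Nat × Nat) : Bool := !(pvIsPreN a b || pvIsPreN b a)
def pvSufN : Nat → Nat → List (Nat × Nat)
  | _, 0 => []
  | e, n + 1 => (e, n + 1) :: pvSufN (e / pvB) n
def pvHSufN (x : Nat × Nat) : List (Nat × Nat) := (pvSufN x.1 x.2).filter (fun p => p.1 % pvB == 104)
def pvPN : List (Nat × Nat) := pvTabN.map Prod.fst
def pvRN : List (Nat × Nat) := pvTabN.map Prod.snd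
def pvHrefN : Nat × Nat := (104 + pvB * (114 + pvB * (101 + pvB * (102 + pvB * 61))), 5)

-- every pattern/replacement starts with "href="; no pattern/replacement overlaps a suffix
-- starting at an 'h' of a replacement or of a pattern's proper tail
def pvChkN : Bool :=
  pvPN.all (fun p => pvIsPreN pvHrefN p) &&
  pvRN.all (fun r => pvIsPreN pvHrefN r) &&
  (pvRN.flatMap pvHSufN).all (fun s => pvPN.all (fun p => pvNoOvN p s)) &&
  (pvPN.flatMap (fun p => pvHSufN (p.1 / pvB, p.2 - 1))).all
    (fun s => pvPN.all (fun p => pvNoOvN p s) && pvRN.all (fun r => pvNoOvN s r))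

set_option maxRecDepth 1000000 in
set_option maxHeartbeats 16000000 in
theorem pvTabN_eq :
    pvRules.map (fun pr => ((pvEnc pr.1, pr.1.length), (pvEnc pr.2, pr.2.length))) = pvTabN := by
  decide

set_option maxRecDepth 1000000 in
set_option maxHeartbeats 16000000 in
theorem pvChkN_holds : pvChkN = true := by decide

-- ---------- facts about the encoding ----------
theorem pvChar_lt (c : Char) : c.toNat < pvB := by
  have := c.valid
  rcases this with h | ⟨h1, h2⟩ <;> (unfold Char.toNat pvB; omega)

theorem pvChar_toNat_inj (c d : Char) (h : c.toNat = d.toNat) : c = d := by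
  apply Char.ext; unfold Char.toNat at h; exact UInt32.toNat_inj.mp h

theorem pvB_pos : 0 < pvB := by unfold pvB; omega

theorem pvEnc_mod (c : Char) (t : List Char) : pvEnc (c :: t) % pvB = c.toNat := by
  show (c.toNat + pvB * pvEnc t) % pvB = c.toNat
  rw [Nat.add_mul_mod_self_left, Nat.mod_eq_of_lt (pvChar_lt c)]

theorem pvEnc_div (c : Char) (t : List Char) : pvEnc (c :: t) / pvB = pvEnc t := by
  show (c.toNat + pvB * pvEnc t) / pvB = pvEnc t
  rw [Nat.add_mul_div_left _ _ pvB_pos, Nat.div_eq_of_lt (pvChar_lt c), Nat.zero_add]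

theorem pvEnc_lt : ∀ l : List Char, pvEnc l < pvB ^ l.length := by
  intro l
  induction l with
  | nil => simp [pvEnc]
  | cons c t ih =>
    show c.toNat + pvB * pvEnc t < pvB ^ (t.length + 1)
    have hc := pvChar_lt c
    have : pvB * pvEnc t + pvB ≤ pvB * pvB ^ t.length := by
      have := Nat.succ_le_of_lt ih
      calc pvB * pvEnc t + pvB = pvB * (pvEnc t + 1) := by ring
        _ ≤ pvB * pvB ^ t.length := Nat.mul_le_mul_left _ this
    calc c.toNat + pvB * pvEnc t < pvB * pvEnc t + pvB := by omega
      _ ≤ pvB * pvB ^ t.length := this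
      _ = pvB ^ (t.length + 1) := by ring

theorem pvEnc_mod_take : ∀ (n : Nat) (l : List Char), pvEnc l % pvB ^ n = pvEnc (l.take n) := by
  intro n
  induction n with
  | zero => intro l; simp [pvEnc, Nat.mod_one]
  | succ n ih =>
    intro l
    cases l with
    | nil => simp [pvEnc]
    | cons c t =>
      rw [List.take_succ_cons]
      show (c.toNat + pvB * pvEnc t) % pvB ^ (n + 1) = c.toNat + pvB * pvEnc (t.take n)
      have hc := pvChar_lt c
      have hpow : pvB ^ (n + 1) = pvB * pvB ^ n := by ring
      rw [hpow, Nat.add_mod, Nat.mul_mod_mul_left]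
      have hmod : pvEnc t % pvB ^ n = pvEnc (t.take n) := ih t
      rw [hmod]
      have hlt : pvEnc (t.take n) < pvB ^ n := by
        have := pvEnc_lt (t.take n)
        have hle : (t.take n).length ≤ n := by simp
        exact lt_of_lt_of_le this (Nat.pow_le_pow_right (by unfold pvB; omega) hle)
      have h1 : c.toNat % (pvB * pvB ^ n) = c.toNat := by
        apply Nat.mod_eq_of_lt
        have : pvB ≤ pvB * pvB ^ n := Nat.le_mul_of_pos_right _ (Nat.pow_pos pvB_pos)
        omega
      rw [h1]
      apply Nat.mod_eq_of_lt
      have : pvB * pvEnc (t.take n) + pvB ≤ pvB * pvB ^ n := by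
        have := Nat.succ_le_of_lt hlt
        calc pvB * pvEnc (t.take n) + pvB = pvB * (pvEnc (t.take n) + 1) := by ring
          _ ≤ pvB * pvB ^ n := Nat.mul_le_mul_left _ this
      omega

theorem pvEnc_inj : ∀ a b : List Char, a.length = b.length → pvEnc a = pvEnc b → a = b := by
  intro a
  induction a with
  | nil => intro b hl _; cases b with | nil => rfl | cons d t => simp at hl
  | cons c t ih =>
    intro b hl he
    cases b with
    | nil => simp at hl
    | cons d u =>
      have hhead : c.toNat = d.toNat := by
        rw [← pvEnc_mod c t, ← pvEnc_mod d u, he]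
      have htail : pvEnc t = pvEnc u := by
        rw [← pvEnc_div c t, ← pvEnc_div d u, he]
      have := ih u (by simpa using hl) htail
      rw [pvChar_toNat_inj c d hhead, this]

theorem pvIsPreN_iff (a b : List Char) :
    pvIsPreN (pvEnc a, a.length) (pvEnc b, b.length) = true ↔ a <+: b := by
  constructor
  · intro h
    simp only [pvIsPreN, Bool.and_eq_true, Nat.ble_eq, beq_iff_eq] at h
    obtain ⟨hle, hmod⟩ := h
    rw [pvEnc_mod_take] at hmod
    have hlen : (b.take a.length).length = a.length := by simp [hle]
    have := pvEnc_inj _ _ (by rw [hlen]) hmod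
    rw [← this]
    exact List.take_prefix _ _
  · intro h
    simp only [pvIsPreN, Bool.and_eq_true, Nat.ble_eq, beq_iff_eq]
    refine ⟨h.length_le, ?_⟩
    rw [pvEnc_mod_take, (List.prefix_iff_eq_take.mp h).symm]

theorem pvNoOvN_spec (a b : List Char)
    (h : pvNoOvN (pvEnc a, a.length) (pvEnc b, b.length) = true) :
    ¬ a <+: b ∧ ¬ b <+: a := by
  simp only [pvNoOvN, Bool.not_eq_eq_eq_not, Bool.not_true, Bool.or_eq_false_iff] at h
  constructor
  · intro hc; rw [(pvIsPreN_iff a b).mpr hc] at h; simp at h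
  · intro hc; rw [(pvIsPreN_iff b a).mpr hc] at h; simp at h

-- ---------- suffix tables ----------
def pvTails : List Char → List (List Char)
  | [] => []
  | c :: t => (c :: t) :: pvTails t

theorem pvTails_mem : ∀ (l : List Char) (j : Nat), j < l.length → l.drop j ∈ pvTails l := by
  intro l
  induction l with
  | nil => intro j h; simp at h
  | cons c t ih =>
    intro j h
    cases j with
    | zero => simp [pvTails]
    | succ j => rw [pvTails]; exact List.mem_cons_of_mem _ (ih j (by simpa using h))

theorem pvSufN_spec : ∀ l : List Char,
    pvSufN (pvEnc l) l.length = (pvTails l).map (fun s => (pvEnc s, s.length)) := by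
  intro l
  induction l with
  | nil => simp [pvSufN, pvTails]
  | cons c t ih =>
    show pvSufN (pvEnc (c :: t)) (t.length + 1) = _
    rw [pvSufN, pvEnc_div, ih, pvTails]
    simp

theorem pvHSufN_mem (l : List Char) (j : Nat) (hj : j < l.length) (hh : l[j] = 'h') :
    (pvEnc (l.drop j), (l.drop j).length) ∈ pvHSufN (pvEnc l, l.length) := by
  unfold pvHSufN
  rw [List.mem_filter]
  constructor
  · show _ ∈ pvSufN (pvEnc l) l.length
    rw [pvSufN_spec]
    exact List.mem_map_of_mem (pvTails_mem l j hj)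
  · have hcons : l.drop j = l[j] :: l.drop (j + 1) := List.drop_eq_getElem_cons hj
    rw [hcons, pvEnc_mod, hh]
    decide

-- ---------- deriving pvGood pvRules ----------
theorem pvMemPN (pr : List Char × List Char) (h : pr ∈ pvRules) :
    (pvEnc pr.1, pr.1.length) ∈ pvPN := by
  unfold pvPN
  rw [← pvTabN_eq, List.map_map]
  exact List.mem_map_of_mem h

theorem pvMemRN (pr : List Char × List Char) (h : pr ∈ pvRules) :
    (pvEnc pr.2, pr.2.length) ∈ pvRN := by
  unfold pvRN
  rw [← pvTabN_eq, List.map_map]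
  exact List.mem_map_of_mem h

theorem pvChkN_parts :
    (∀ x ∈ pvPN, pvIsPreN pvHrefN x = true) ∧
    (∀ x ∈ pvRN, pvIsPreN pvHrefN x = true) ∧
    (∀ s ∈ pvRN.flatMap pvHSufN, ∀ x ∈ pvPN, pvNoOvN x s = true) ∧
    (∀ s ∈ pvPN.flatMap (fun p => pvHSufN (p.1 / pvB, p.2 - 1)),
      (∀ x ∈ pvPN, pvNoOvN x s = true) ∧ (∀ r ∈ pvRN, pvNoOvN s r = true)) := by
  have h := pvChkN_holds
  unfold pvChkN at h
  simp only [Bool.and_eq_true, List.all_eq_true] at h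
  exact ⟨h.1.1.1, h.1.1.2, h.1.2, fun s hs => ⟨(h.2 s hs).1, (h.2 s hs).2⟩⟩

theorem pvHrefN_eq : pvHrefN = (pvEnc pvHref, pvHref.length) := by decide

theorem pvHref_prefix_pat (pr : List Char × List Char) (h : pr ∈ pvRules) : pvHref <+: pr.1 := by
  have := pvChkN_parts.1 _ (pvMemPN pr h)
  rw [pvHrefN_eq] at this
  exact (pvIsPreN_iff pvHref pr.1).mp this

theorem pvHref_prefix_rep (pr : List Char × List Char) (h : pr ∈ pvRules) : pvHref <+: pr.2 := by
  have := pvChkN_parts.2.1 _ (pvMemRN pr h)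
  rw [pvHrefN_eq] at this
  exact (pvIsPreN_iff pvHref pr.2).mp this

theorem pvHref_head (l : List Char) (h : pvHref <+: l) : ∃ t, l = 'h' :: t := by
  obtain ⟨u, hu⟩ := h
  exact ⟨['r', 'e', 'f', '='] ++ u, by rw [← hu]; rfl⟩

theorem pvHeadNe (c d : Char) (a b : List Char) (h : c ≠ d) :
    ¬ (c :: a) <+: (d :: b) ∧ ¬ (d :: b) <+: (c :: a) := by
  constructor
  · intro hc; exact h (List.cons_prefix_cons.mp hc).1
  · intro hc; exact h ((List.cons_prefix_cons.mp hc).1).symm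

-- a pattern never overlaps the h-suffixes (checked) nor the non-h suffixes (head mismatch)
theorem pvPat_noOv_suffix (pk : List Char) (hk : pvHref <+: pk) (l : List Char) (j : Nat)
    (hj : j < l.length)
    (hchk : ∀ s ∈ pvHSufN (pvEnc l, l.length), pvNoOvN (pvEnc pk, pk.length) s = true) :
    ¬ pk <+: l.drop j ∧ ¬ l.drop j <+: pk := by
  by_cases hh : l[j] = 'h'
  · exact pvNoOvN_spec pk (l.drop j) (hchk _ (pvHSufN_mem l j hj hh))
  · obtain ⟨tk, htk⟩ := pvHref_head pk hk
    have hcons : l.drop j = l[j] :: l.drop (j + 1) := List.drop_eq_getElem_cons hj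
    rw [htk, hcons]
    exact pvHeadNe 'h' l[j] tk (l.drop (j + 1)) (fun hc => hh hc.symm)

theorem pvTailEnc (pk : List Char) (hk : pvHref <+: pk) :
    (pvEnc pk / pvB, pk.length - 1) = (pvEnc (pk.drop 1), (pk.drop 1).length) := by
  obtain ⟨tk, htk⟩ := pvHref_head pk hk
  rw [htk]
  show (pvEnc ('h' :: tk) / pvB, tk.length) = (pvEnc tk, tk.length)
  rw [pvEnc_div]

theorem pvGood_rules : pvGood pvRules := by
  obtain ⟨h1, h2, h3, h4⟩ := pvChkN_parts
  constructor
  · intro pr hpr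
    obtain ⟨t, ht⟩ := pvHref_head pr.1 (pvHref_prefix_pat pr hpr)
    simp [ht]
  · intro pk hpk pi hpi
    constructor
    · -- the pattern pk.1 never matches inside text emitted for pi.2
      intro j hj
      exact pvPat_noOv_suffix pk.1 (pvHref_prefix_pat pk hpk) pi.2 j hj
        (fun s hs => h3 s (List.mem_flatMap.mpr ⟨_, pvMemRN pi hpi, hs⟩) _ (pvMemPN pk hpk))
    · intro j hj1 hj2
      -- suffixes of pk.1 at positions ≥ 1 are suffixes of pk.1.drop 1
      have hdrop : pk.1.drop j = (pk.1.drop 1).drop (j - 1) := by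
        rw [List.drop_drop]; congr 1; omega
      have hjd : j - 1 < (pk.1.drop 1).length := by simp; omega
      by_cases hh : (pk.1.drop 1)[j - 1] = 'h'
      · have hmem : (pvEnc ((pk.1.drop 1).drop (j - 1)), ((pk.1.drop 1).drop (j - 1)).length)
            ∈ pvPN.flatMap (fun p => pvHSufN (p.1 / pvB, p.2 - 1)) := by
          apply List.mem_flatMap.mpr
          refine ⟨(pvEnc pk.1, pk.1.length), pvMemPN pk hpk, ?_⟩
          rw [pvTailEnc pk.1 (pvHref_prefix_pat pk hpk)]
          exact pvHSufN_mem _ _ hjd hh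
        obtain ⟨ha, hb⟩ := h4 _ hmem
        constructor
        · have := pvNoOvN_spec pi.1 ((pk.1.drop 1).drop (j - 1)) (ha _ (pvMemPN pi hpi))
          rw [← hdrop] at this
          exact ⟨this.1, this.2⟩
        · have := pvNoOvN_spec ((pk.1.drop 1).drop (j - 1)) pi.2 (hb _ (pvMemRN pi hpi))
          rw [← hdrop] at this
          exact ⟨this.1, this.2⟩
      · -- head of the suffix is not 'h' while pi.1 and pi.2 start with 'h'
        have hcons : (pk.1.drop 1).drop (j - 1)
            = (pk.1.drop 1)[j - 1] :: (pk.1.drop 1).drop (j - 1 + 1) := List.drop_eq_getElem_cons hjd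
        obtain ⟨t1, ht1⟩ := pvHref_head pi.1 (pvHref_prefix_pat pi hpi)
        obtain ⟨t2, ht2⟩ := pvHref_head pi.2 (pvHref_prefix_rep pi hpi)
        rw [hdrop, hcons, ht1, ht2]
        have hne : (pk.1.drop 1)[j - 1] ≠ 'h' := hh
        constructor
        · obtain ⟨a, b⟩ := pvHeadNe 'h' _ t1 ((pk.1.drop 1).drop (j - 1 + 1)) (fun hc => hne hc.symm)
          exact ⟨a, b⟩
        · obtain ⟨a, b⟩ := pvHeadNe _ 'h' ((pk.1.drop 1).drop (j - 1 + 1)) t2 hne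
          exact ⟨a, b⟩

-- ---------- equation lemmas for the scans ----------
theorem pvScan1_nil (p r : List Char) : pvScan1 p r [] = [] := by rw [pvScan1]

theorem pvScan1_cons_pos (p r : List Char) (c : Char) (t : List Char) (h : p <+: c :: t) :
    pvScan1 p r (c :: t) = r ++ pvScan1 p r (t.drop (p.length - 1)) := by
  rw [pvScan1, if_pos (List.isPrefixOf_iff_prefix.mpr h)]

theorem pvScan1_cons_neg (p r : List Char) (c : Char) (t : List Char) (h : ¬ p <+: c :: t) :
    pvScan1 p r (c :: t) = c :: pvScan1 p r t := by
  rw [pvScan1, if_neg (by simpa [List.isPrefixOf_iff_prefix] using h)]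

theorem pvScanM_nil (R : List (List Char × List Char)) : pvScanM R [] = [] := by rw [pvScanM]

theorem pvScanM_cons_some (R : List (List Char × List Char)) (c : Char) (t : List Char)
    (pr : List Char × List Char)
    (h : R.find? (fun pr => pr.1.isPrefixOf (c :: t)) = some pr) :
    pvScanM R (c :: t) = pr.2 ++ pvScanM R (t.drop (pr.1.length - 1)) := by
  rw [pvScanM, h]

theorem pvScanM_cons_none (R : List (List Char × List Char)) (c : Char) (t : List Char)
    (h : R.find? (fun pr => pr.1.isPrefixOf (c :: t)) = none) :
    pvScanM R (c :: t) = c :: pvScanM R t := by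
  rw [pvScanM, h]

theorem pvFind_none_iff (R : List (List Char × List Char)) (s : List Char) :
    R.find? (fun pr => pr.1.isPrefixOf s) = none ↔ ∀ pr ∈ R, ¬ pr.1 <+: s := by
  simp [List.find?_eq_none, List.isPrefixOf_iff_prefix]

theorem pvPrefix_append_or (p w x : List Char) (h : p <+: w ++ x) : p <+: w ∨ w <+: p :=
  List.prefix_or_prefix_of_prefix h (List.prefix_append w x)

-- pvScan1 eats its own pattern at the front
theorem pvScan1_self (p r x : List Char) (hp : p ≠ []) :
    pvScan1 p r (p ++ x) = r ++ pvScan1 p r x := by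
  cases p with
  | nil => exact absurd rfl hp
  | cons a q =>
    rw [List.cons_append,
      pvScan1_cons_pos (a :: q) r a (q ++ x) (List.cons_prefix_cons.mpr ⟨rfl, List.prefix_append q x⟩)]
    have hdq : (q ++ x).drop ((a :: q).length - 1) = x := by
      simp
    rw [hdq]

-- ---------- PASS: pvScan1 walks over a block it can never match into ----------
theorem pvPass (p r : List Char) :
    ∀ (w x : List Char), (∀ j < w.length, ¬ p <+: w.drop j ∧ ¬ w.drop j <+: p) →
      pvScan1 p r (w ++ x) = w ++ pvScan1 p r x := by
  intro w
  induction w with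
  | nil => intro x _; simp
  | cons d w' ih =>
    intro x hw
    have hnp : ¬ p <+: (d :: w') ++ x := by
      intro hp
      rcases pvPrefix_append_or p (d :: w') x hp with h1 | h1
      · exact (hw 0 (by simp)).1 h1
      · exact (hw 0 (by simp)).2 h1
    rw [List.cons_append, pvScan1_cons_neg p r d (w' ++ x) (by simpa using hnp),
      ih x (fun j hj => hw (j + 1) (by simp only [List.length_cons]; omega))]
    rfl

-- ---------- SKIP: a scan with no match in the first n positions copies them ----------
theorem pvSkip (R : List (List Char × List Char)) :
    ∀ (n : Nat) (s : List Char), (∀ j < n, ∀ pr ∈ R, ¬ pr.1 <+: s.drop j) →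
      pvScanM R s = s.take n ++ pvScanM R (s.drop n) := by
  intro n
  induction n with
  | zero => intro s _; simp
  | succ n ih =>
    intro s hs
    cases s with
    | nil => simp [pvScanM_nil]
    | cons c t =>
      have hnone : R.find? (fun pr => pr.1.isPrefixOf (c :: t)) = none :=
        (pvFind_none_iff R (c :: t)).mpr (fun pr hpr => hs 0 (by omega) pr hpr)
      rw [pvScanM_cons_none R c t hnone, ih t (fun j hj pr hpr => hs (j + 1) (by omega) pr hpr)]
      simp

-- ---------- AUX: a proper suffix of p surviving a scan was already in the text ----------
theorem pvAux (R : List (List Char × List Char)) (p : List Char)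
    (H4 : ∀ pr ∈ R, ∀ m, 1 ≤ m → m < p.length →
        ¬ p.drop m <+: pr.2 ∧ ¬ pr.2 <+: p.drop m) :
    ∀ (n : Nat) (t : List Char), t.length ≤ n → ∀ m, 1 ≤ m → m < p.length →
      p.drop m <+: pvScanM R t → p.drop m <+: t := by
  intro n
  induction n with
  | zero =>
    intro t ht m _ h2 hp
    have htn : t = [] := by cases t <;> simp_all
    subst htn
    rw [pvScanM_nil] at hp
    have h0 : p.drop m = [] := List.prefix_nil.mp hp
    have : p.length - m = 0 := by simpa using congrArg List.length h0
    omega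
  | succ n ih =>
    intro t ht m h1 h2 hp
    cases t with
    | nil =>
      rw [pvScanM_nil] at hp
      have h0 : p.drop m = [] := List.prefix_nil.mp hp
      have : p.length - m = 0 := by simpa using congrArg List.length h0
      omega
    | cons c t' =>
      cases hf : R.find? (fun pr => pr.1.isPrefixOf (c :: t')) with
      | some pr =>
        rw [pvScanM_cons_some R c t' pr hf] at hp
        have hmem : pr ∈ R := List.mem_of_find?_eq_some hf
        rcases pvPrefix_append_or _ _ _ hp with h | h
        · exact absurd h (H4 pr hmem m h1 h2).1
        · exact absurd h (H4 pr hmem m h1 h2).2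
      | none =>
        rw [pvScanM_cons_none R c t' hf] at hp
        have hdm : p.drop m = p[m] :: p.drop (m + 1) := List.drop_eq_getElem_cons h2
        rw [hdm] at hp
        rcases List.cons_prefix_cons.mp hp with ⟨hc, htail⟩
        subst hc
        by_cases hm1 : m + 1 < p.length
        · have := ih t' (by simpa using ht) (m + 1) (by omega) hm1 htail
          rw [hdm]
          exact List.cons_prefix_cons.mpr ⟨rfl, this⟩
        · have hnil : p.drop (m + 1) = [] := List.drop_eq_nil_of_le (by omega)
          rw [hdm, hnil]
          exact List.cons_prefix_cons.mpr ⟨rfl, List.nil_prefix⟩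

-- ---------- MAIN: appending one rule to a finished scan ----------
theorem pvMain (R : List (List Char × List Char)) (p r : List Char)
    (hp : p ≠ [])
    (H2 : ∀ pr ∈ R, ∀ j < pr.2.length, ¬ p <+: pr.2.drop j ∧ ¬ pr.2.drop j <+: p)
    (H3 : ∀ pr ∈ R, ∀ j, 1 ≤ j → j < p.length → ¬ pr.1 <+: p.drop j ∧ ¬ p.drop j <+: pr.1)
    (H4 : ∀ pr ∈ R, ∀ m, 1 ≤ m → m < p.length → ¬ p.drop m <+: pr.2 ∧ ¬ pr.2 <+: p.drop m) :
    ∀ (n : Nat) (s : List Char), s.length ≤ n →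
      pvScan1 p r (pvScanM R s) = pvScanM (R ++ [(p, r)]) s := by
  intro n
  induction n with
  | zero =>
    intro s hs
    have hsn : s = [] := by cases s <;> simp_all
    subst hsn
    simp [pvScanM_nil, pvScan1_nil]
  | succ n ih =>
    intro s hs
    cases s with
    | nil => simp [pvScanM_nil, pvScan1_nil]
    | cons c t =>
      cases hf : R.find? (fun pr => pr.1.isPrefixOf (c :: t)) with
      | some pr =>
        have hmem : pr ∈ R := List.mem_of_find?_eq_some hf
        have hfapp : (R ++ [(p, r)]).find? (fun pr => pr.1.isPrefixOf (c :: t)) = some pr := by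
          rw [List.find?_append, hf]; rfl
        rw [pvScanM_cons_some R c t pr hf, pvScanM_cons_some _ c t pr hfapp,
            pvPass p r pr.2 _ (fun j hj => H2 pr hmem j hj),
            ih _ (by simp only [List.length_cons, List.length_drop] at hs ⊢; omega)]
      | none =>
        by_cases hps : p <+: c :: t
        · -- the new rule fires here
          have hfapp : (R ++ [(p, r)]).find? (fun pr => pr.1.isPrefixOf (c :: t)) = some (p, r) := by
            rw [List.find?_append, hf]
            simp [List.isPrefixOf_iff_prefix, hps]
          obtain ⟨u, hu⟩ := hps
          have hskip : pvScanM R t = t.take (p.length - 1) ++ pvScanM R (t.drop (p.length - 1)) := by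
            apply pvSkip R (p.length - 1) t
            intro j hj pr hpr hcon
            have hdropt : t.drop j = p.drop (j + 1) ++ u := by
              have h1 : t = (c :: t).drop 1 := rfl
              rw [h1, List.drop_drop, ← hu, List.drop_append_of_le_length (by omega),
                Nat.add_comm 1 j]
            rw [hdropt] at hcon
            rcases pvPrefix_append_or _ _ _ hcon with h | h
            · exact (H3 pr hpr (j + 1) (by omega) (by omega)).1 h
            · exact (H3 pr hpr (j + 1) (by omega) (by omega)).2 h
          have hcons : c :: pvScanM R t = p ++ pvScanM R (t.drop (p.length - 1)) := by
            rw [hskip]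
            have hk : p.length - 1 + 1 = p.length := by cases p <;> simp_all
            have htake : c :: t.take (p.length - 1) = p := by
              have h1 : (c :: t).take p.length = p := (List.prefix_iff_eq_take.mp ⟨u, hu⟩).symm
              rw [← hk, List.take_succ_cons] at h1
              exact h1
            rw [← List.cons_append, htake]
          rw [pvScanM_cons_none R c t hf, hcons, pvScanM_cons_some _ c t (p, r) hfapp,
            pvScan1_self p r _ hp,
            ih _ (by simp only [List.length_cons, List.length_drop] at hs ⊢; omega)]
        · -- no rule fires here at all
          have hfapp : (R ++ [(p, r)]).find? (fun pr => pr.1.isPrefixOf (c :: t)) = none := by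
            rw [List.find?_append, hf]
            simp [List.isPrefixOf_iff_prefix, hps]
          rw [pvScanM_cons_none R c t hf, pvScanM_cons_none _ c t hfapp]
          have hnp : ¬ p <+: c :: pvScanM R t := by
            intro hcon
            cases p with
            | nil => exact hp rfl
            | cons a q =>
              rcases List.cons_prefix_cons.mp hcon with ⟨hac, hq⟩
              subst hac
              cases q with
              | nil => exact hps (List.cons_prefix_cons.mpr ⟨rfl, List.nil_prefix⟩)
              | cons b q' =>
                have hqt : (b :: q') <+: t :=
                  pvAux R (a :: b :: q') H4 t.length t le_rfl 1 le_rfl (by simp) hq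
                exact hps (List.cons_prefix_cons.mpr ⟨rfl, hqt⟩)
          rw [pvScan1_cons_neg p r _ _ hnp,
            ih _ (by simpa using Nat.le_of_succ_le_succ hs)]

-- ---------- FOLD: sequential scans = one multi-rule scan ----------
theorem pvScanM_nil_rules : ∀ s : List Char, pvScanM [] s = s := by
  intro s
  induction s with
  | nil => rw [pvScanM_nil]
  | cons c t ih => rw [pvScanM_cons_none [] c t (by simp), ih]

theorem pvGood_sublist (R R' : List (List Char × List Char)) (hsub : ∀ x ∈ R', x ∈ R)
    (h : pvGood R) : pvGood R' :=
  ⟨fun pr hpr => h.1 pr (hsub pr hpr),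
   fun pk hpk pi hpi => h.2 pk (hsub pk hpk) pi (hsub pi hpi)⟩

theorem pvFold : ∀ (R : List (List Char × List Char)), pvGood R →
    ∀ s : List Char, List.foldl (fun l pr => pvScan1 pr.1 pr.2 l) s R = pvScanM R s := by
  intro R
  induction R using List.reverseRecOn with
  | nil => intro _ s; simp [pvScanM_nil_rules]
  | append_singleton R' pr ih =>
    intro h s
    have hsub : ∀ x ∈ R', x ∈ R' ++ [pr] := fun x hx => List.mem_append_left _ hx
    have hmem : pr ∈ R' ++ [pr] := List.mem_append_right _ (by simp)
    rw [List.foldl_append, List.foldl_cons, List.foldl_nil,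
      ih (pvGood_sublist _ R' hsub h) s]
    have := pvMain R' pr.1 pr.2 (h.1 pr hmem)
      (fun pi hpi j hj => (h.2 pr hmem pi (hsub pi hpi)).1 j hj)
      (fun pi hpi j h1 h2 => ((h.2 pr hmem pi (hsub pi hpi)).2 j h1 h2).1)
      (fun pi hpi j h1 h2 => ((h.2 pr hmem pi (hsub pi hpi)).2 j h1 h2).2)
      s.length s le_rfl
    simpa using this

-- ---------- pvScanB = pvScanM pvRules ----------
theorem pvHrefSelf : ∀ j, 1 ≤ j → j < 5 →
    ¬ pvHref <+: pvHref.drop j ∧ ¬ pvHref.drop j <+: pvHref := by decide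

theorem pvScanB_cons_some (c : Char) (t : List Char) (pr : List Char × List Char)
    (hg : pvHref <+: c :: t)
    (h : pvRules.find? (fun pr => pr.1.isPrefixOf (c :: t)) = some pr) :
    pvScanB (c :: t) = pr.2 ++ pvScanB (t.drop (pr.1.length - 1)) := by
  rw [pvScanB, if_pos (List.isPrefixOf_iff_prefix.mpr hg), h]

theorem pvScanB_cons_none (c : Char) (t : List Char)
    (hg : pvHref <+: c :: t)
    (h : pvRules.find? (fun pr => pr.1.isPrefixOf (c :: t)) = none) :
    pvScanB (c :: t) = pvHref ++ pvScanB (t.drop 4) := by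
  rw [pvScanB, if_pos (List.isPrefixOf_iff_prefix.mpr hg), h]

theorem pvScanB_cons_nohref (c : Char) (t : List Char) (hg : ¬ pvHref <+: c :: t) :
    pvScanB (c :: t) = c :: pvScanB t := by
  rw [pvScanB, if_neg (by simpa [List.isPrefixOf_iff_prefix] using hg)]

theorem pvScanB_eq : ∀ (n : Nat) (s : List Char), s.length ≤ n → pvScanB s = pvScanM pvRules s := by
  intro n
  induction n with
  | zero =>
    intro s hs
    have hsn : s = [] := by cases s <;> simp_all
    subst hsn
    rw [pvScanB, pvScanM_nil]
  | succ n ih =>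
    intro s hs
    cases s with
    | nil => rw [pvScanB, pvScanM_nil]
    | cons c t =>
      by_cases hg : pvHref <+: c :: t
      · cases hf : pvRules.find? (fun pr => pr.1.isPrefixOf (c :: t)) with
        | some pr =>
          rw [pvScanB_cons_some c t pr hg hf, pvScanM_cons_some _ c t pr hf,
            ih _ (by simp only [List.length_cons, List.length_drop] at hs ⊢; omega)]
        | none =>
          rw [pvScanB_cons_none c t hg hf]
          obtain ⟨u, hu⟩ := hg
          have hu5 : (c :: t).drop 5 = u := by rw [← hu]; rfl
          have ht4 : t.drop 4 = u := hu5
          have hskip : pvScanM pvRules (c :: t)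
              = (c :: t).take 5 ++ pvScanM pvRules ((c :: t).drop 5) := by
            apply pvSkip
            intro j hj pr hpr hcon
            have hhp : pvHref <+: pr.1 := pvHref_prefix_pat pr hpr
            cases Nat.eq_zero_or_pos j with
            | inl hj0 =>
              subst hj0
              exact (pvFind_none_iff pvRules (c :: t)).mp hf pr hpr (by simpa using hcon)
            | inr hj1 =>
              have hdropj : (c :: t).drop j = pvHref.drop j ++ u := by
                rw [← hu, List.drop_append_of_le_length (by simp [pvHref]; omega)]
              rw [hdropj] at hcon
              have hcon2 : pvHref <+: pvHref.drop j ++ u := hhp.trans hcon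
              rcases pvPrefix_append_or _ _ _ hcon2 with h | h
              · exact (pvHrefSelf j hj1 hj).1 h
              · exact (pvHrefSelf j hj1 hj).2 h
          have htake : (c :: t).take 5 = pvHref := (List.prefix_iff_eq_take.mp ⟨u, hu⟩).symm
          rw [hskip, htake, hu5, ← ht4,
            ih _ (by simp only [List.length_cons, List.length_drop] at hs ⊢; omega)]
      · have hf : pvRules.find? (fun pr => pr.1.isPrefixOf (c :: t)) = none := by
          rw [pvFind_none_iff pvRules (c :: t)]
          intro pr hpr hcon
          exact hg ((pvHref_prefix_pat pr hpr).trans hcon)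
        rw [pvScanB_cons_nohref c t hg, pvScanM_cons_none _ c t hf,
          ih _ (by simpa using Nat.le_of_succ_le_succ hs)]

-- ---------- Python replace = pvScan1 (nonempty pattern) ----------
theorem pvReplace_go (old new : List Char) (hold : old ≠ []) :
    ∀ (fuel : Nat) (l acc : List Char), l.length ≤ fuel →
      PySem.Chars.replace.go old new fuel l acc = acc.reverse ++ pvScan1 old new l := by
  intro fuel
  induction fuel with
  | zero =>
    intro l acc hl
    have hln : l = [] := by cases l <;> simp_all
    subst hln
    simp [PySem.Chars.replace.go, pvScan1_nil]
  | succ fuel ih =>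
    intro l acc hl
    cases l with
    | nil => simp [PySem.Chars.replace.go, pvScan1_nil]
    | cons c t =>
      rw [PySem.Chars.replace.go]
      by_cases h : old <+: c :: t
      · rw [if_pos (List.isPrefixOf_iff_prefix.mpr h)]
        have hlen : 0 < old.length := by cases old <;> simp_all
        have hdrop : List.drop old.length (c :: t) = t.drop (old.length - 1) := by
          have hol : old.length = (old.length - 1) + 1 := by omega
          rw [hol]
          rfl
        rw [hdrop, ih _ _ (by simp only [List.length_cons, List.length_drop] at hl ⊢; omega),
          pvScan1_cons_pos old new c t h]
        simp
      · rw [if_neg (by simpa [List.isPrefixOf_iff_prefix] using h),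
            ih _ _ (by simpa using Nat.le_of_succ_le_succ hl),
            pvScan1_cons_neg old new c t h]
        simp

theorem pvReplace_eq (s old new : List Char) (hold : old ≠ []) :
    PySem.Chars.replace s old new = pvScan1 old new s := by
  rw [PySem.Chars.replace]
  rw [if_neg (by simpa [List.isEmpty_iff] using hold)]
  simpa using pvReplace_go old new hold s.length s [] le_rfl

-- ---------- A's fold, moved to the character level ----------
theorem pvFoldA (items : List (String × String)) : ∀ (s : String),
    (List.foldl (fun content kv =>
      let target_abs := "/" ++ kv.1
      let target_clean := kv.2
      let c1 := PySem.Str.replace content ("href=\"" ++ target_abs ++ "\"") ("href=\"" ++ target_clean ++ "\"")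
      let c2 := PySem.Str.replace c1 ("href='" ++ target_abs ++ "'") ("href='" ++ target_clean ++ "'")
      PySem.Str.replace c2 ("href=\"" ++ pvBaseUrl ++ target_abs ++ "\"")
        ("href=\"" ++ pvBaseUrl ++ target_clean ++ "\"")) s items).toList
    = List.foldl (fun l pr => pvScan1 pr.1 pr.2 l) s.toList (items.flatMap pvRules3) := by
  induction items with
  | nil => intro s; simp
  | cons kv items ih =>
    intro s
    rw [List.foldl_cons, List.flatMap_cons, List.foldl_append, ih]
    congr 1
    simp only [pvRules3, List.foldl_cons, List.foldl_nil]
    have hne1 : ("href=\"" ++ ("/" ++ kv.1) ++ "\"").toList ≠ [] := by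
      simp [String.toList_append]
    have hne2 : ("href='" ++ ("/" ++ kv.1) ++ "'").toList ≠ [] := by
      simp [String.toList_append]
    have hne3 : ("href=\"" ++ pvBaseUrl ++ ("/" ++ kv.1) ++ "\"").toList ≠ [] := by
      simp [String.toList_append]
    rw [PySem.Str.toList_replace, PySem.Str.toList_replace, PySem.Str.toList_replace,
        pvReplace_eq _ _ _ hne1, pvReplace_eq _ _ _ hne2, pvReplace_eq _ _ _ hne3]

-- ===== VERDICT (by name: the statement is the Claim_ definition above) =====
theorem update_internal_links_spec : Claim_equal_update_internal_links := by
  intro content _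
  unfold Spec_update_internal_links update_internal_links update_internal_links_alt
  apply String.toList_inj.mp
  rw [String.toList_ofList, pvFoldA pvTargetMapping content,
    pvScanB_eq content.toList.length content.toList le_rfl]
  exact pvFold pvRules pvGood_rules content.toList
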